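-- pv_equiv track=rewrite | github.com/h-ch22/CodingTest | 프로그래머스/0/120861. 캐릭터의 좌표/캐릭터의 좌표.py | solution
-- ===== SOURCE A (Python) =====
-- def solution(keyinput, board):
--     limit_x_min, limit_x_max = ((board[0] - 1) // 2) * -1, (board[0] - 1) // 2
--     limit_y_min, limit_y_max = ((board[1] - 1) // 2) * -1, (board[1] - 1) // 2
--
--     answer = [0, 0]
--
--     for k in keyinput:
--         if k == 'left' and limit_x_min < answer[0]:
--             answer[0] -= 1
--
--         elif k == 'right' and answer[0] < limit_x_max:
--             answer[0] += 1
--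
--         elif k == 'up' and answer[1] < limit_y_max:
--             answer[1] += 1
--
--         elif k == 'down' and limit_y_min < answer[1]:
--             answer[1] -= 1
--
--     return answer
-- ===== SOURCE B (Python) =====
-- def _walk(keys, half, neg_key, pos_key):
--     pos = 0
--     for k in keys:
--         step = (k == pos_key) - (k == neg_key)
--         if -half <= pos + step <= half:
--             pos += step
--     return pos
--
--
-- def solution(keyinput, board):
--     return [_walk(keyinput, (board[0] - 1) // 2, 'left', 'right'),
--             _walk(keyinput, (board[1] - 1) // 2, 'down', 'up')]
-- ===== Notes on version B (the rewrite author's own statement) =====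
-- stated objective: simpler
-- what changed: B exploits that the axes are independent: one generic 1-D bounded-walk helper (signed step from key comparison + target-in-range check) is run once per axis, replacing A's single loop with four direction-specific guarded elif branches over a mutable pair.
import Mathlib
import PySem

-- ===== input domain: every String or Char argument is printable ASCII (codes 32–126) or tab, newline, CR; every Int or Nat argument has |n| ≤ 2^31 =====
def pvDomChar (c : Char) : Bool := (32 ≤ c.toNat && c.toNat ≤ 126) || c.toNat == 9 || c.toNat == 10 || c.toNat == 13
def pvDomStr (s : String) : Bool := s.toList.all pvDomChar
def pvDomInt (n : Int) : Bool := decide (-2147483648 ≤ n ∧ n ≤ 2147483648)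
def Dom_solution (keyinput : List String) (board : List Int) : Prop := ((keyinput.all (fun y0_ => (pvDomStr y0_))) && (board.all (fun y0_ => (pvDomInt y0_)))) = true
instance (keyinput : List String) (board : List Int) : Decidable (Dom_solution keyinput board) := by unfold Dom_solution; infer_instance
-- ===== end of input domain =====

-- B replaces the four direction-specific guarded elif branches by one generic 1-D bounded
-- walk (signed step + target-in-range check) run independently per axis: simpler decomposition,
-- same O(n) cost.

-- ===== PORT A =====
-- loop body of A's for-loop (answer kept as the pair (answer[0], answer[1]))
def stepA (lxmin lxmax lymin lymax : Int) (ans : Int × Int) (k : String) : Int × Int :=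
  if k = "left" ∧ lxmin < ans.1 then (ans.1 - 1, ans.2)
  else if k = "right" ∧ ans.1 < lxmax then (ans.1 + 1, ans.2)
  else if k = "up" ∧ ans.2 < lymax then (ans.1, ans.2 + 1)
  else if k = "down" ∧ lymin < ans.2 then (ans.1, ans.2 - 1)
  else ans

def solution (keyinput : List String) (board : List Int) : List Int :=
  match PySem.List.pyGet? board 0, PySem.List.pyGet? board 1 with
  | some b0, some b1 =>
      let lxmax := PySem.Int.floordiv (b0 - 1) 2
      let lxmin := lxmax * (-1)
      let lymax := PySem.Int.floordiv (b1 - 1) 2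
      let lymin := lymax * (-1)
      let ans := keyinput.foldl (stepA lxmin lxmax lymin lymax) (0, 0)
      [ans.1, ans.2]
  | _, _ => []  -- Python A raises IndexError here; excluded by Pre_solution

-- ===== PORT B =====
-- loop body of _walk
def stepB (half : Int) (negKey posKey : String) (pos : Int) (k : String) : Int :=
  let step : Int := (if k = posKey then 1 else 0) - (if k = negKey then 1 else 0)
  if -half ≤ pos + step ∧ pos + step ≤ half then pos + step else pos

def walk (keys : List String) (half : Int) (negKey posKey : String) : Int :=
  keys.foldl (stepB half negKey posKey) 0

def solution_alt (keyinput : List String) (board : List Int) : List Int :=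
  match PySem.List.pyGet? board 0 with
  | none => []  -- Python B raises IndexError here; excluded by Pre_solution
  | some b0 =>
    match PySem.List.pyGet? board 1 with
    | none => []  -- Python B raises IndexError here; excluded by Pre_solution
    | some b1 =>
        [walk keyinput (PySem.Int.floordiv (b0 - 1) 2) "left" "right",
         walk keyinput (PySem.Int.floordiv (b1 - 1) 2) "down" "up"]

-- ===== PRECONDITION & SPEC =====
-- Pre_ excludes only boards with fewer than two entries, on which both Pythons raise IndexError.
def Pre_solution (keyinput : List String) (board : List Int) : Prop := 2 ≤ board.length
instance (keyinput : List String) (board : List Int) : Decidable (Pre_solution keyinput board) := by unfold Pre_solution; infer_instance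
def pvWitness_solution : List String × List Int := (["left", "up", "left"], [5, 3])

def Spec_solution (keyinput : List String) (board : List Int) (out : List Int) : Prop := out = solution_alt keyinput board
instance (keyinput : List String) (board : List Int) (out : List Int) : Decidable (Spec_solution keyinput board out) := by unfold Spec_solution; infer_instance

-- ===== CLAIM (what is proved, stated in full; the proofs are below) =====
def Claim_equal_solution : Prop := ∀ (keyinput : List String) (board : List Int), Dom_solution keyinput board → Pre_solution keyinput board → Spec_solution keyinput board (solution keyinput board)

-- ===== LEMMAS AND PROOFS =====

-- one step of A equals one independent B-step per axis, given the position bounds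
lemma stepA_eq_stepB (hx hy x y : Int) (k : String)
    (hxb : -(max hx 0) ≤ x ∧ x ≤ max hx 0) (hyb : -(max hy 0) ≤ y ∧ y ≤ max hy 0) :
    stepA (hx * (-1)) hx (hy * (-1)) hy (x, y) k
      = (stepB hx "left" "right" x k, stepB hy "down" "up" y k) := by
  unfold stepA stepB
  by_cases hL : k = "left" <;> by_cases hR : k = "right" <;>
    by_cases hU : k = "up" <;> by_cases hD : k = "down" <;>
    simp_all <;> split_ifs <;> simp_all [Prod.ext_iff] <;> omega

-- a B-step keeps the position within the (truncated) bounds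
lemma stepB_bounds (half : Int) (nk pk : String) (x : Int) (k : String)
    (hb : -(max half 0) ≤ x ∧ x ≤ max half 0) :
    -(max half 0) ≤ stepB half nk pk x k ∧ stepB half nk pk x k ≤ max half 0 := by
  simp only [stepB]
  split_ifs <;> omega

-- A's coupled fold decomposes into the two independent axis walks
lemma fold_decomp (keys : List String) (hx hy x y : Int)
    (hxb : -(max hx 0) ≤ x ∧ x ≤ max hx 0) (hyb : -(max hy 0) ≤ y ∧ y ≤ max hy 0) :
    keys.foldl (stepA (hx * (-1)) hx (hy * (-1)) hy) (x, y)
      = (keys.foldl (stepB hx "left" "right") x, keys.foldl (stepB hy "down" "up") y) := by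
  induction keys generalizing x y with
  | nil => rfl
  | cons k ks ih =>
      simp only [List.foldl]
      rw [stepA_eq_stepB hx hy x y k hxb hyb]
      exact ih _ _ (stepB_bounds hx "left" "right" x k hxb) (stepB_bounds hy "down" "up" y k hyb)

-- ===== VERDICT (by name: the statement is the Claim_ definition above) =====
theorem solution_spec : Claim_equal_solution := by
  intro keyinput board _ hpre
  unfold Pre_solution at hpre
  match board with
  | b0 :: b1 :: rest =>
      show solution keyinput (b0 :: b1 :: rest) = solution_alt keyinput (b0 :: b1 :: rest)
      unfold solution solution_alt walk
      rw [show PySem.List.pyGet? (b0 :: b1 :: rest) (0 : Int) = some b0 from by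
            simp [PySem.List.pyGet?, PySem.List.pyIdx?,
                  show (0:Int) ≤ (rest.length : Int) + 1 from by positivity],
          show PySem.List.pyGet? (b0 :: b1 :: rest) (1 : Int) = some b1 from by
            simp [PySem.List.pyGet?, PySem.List.pyIdx?]]
      dsimp only
      rw [fold_decomp keyinput _ _ 0 0 (by omega) (by omega)]
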